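-- pv_equiv track=rewrite | github.com/Shubham-Choudhury/GeeksforGeeks-Problems | 2023 October/Boundary traversal of matrix/main.py | BoundaryTraversal
-- ===== SOURCE A (Python) =====
-- def BoundaryTraversal(matrix, n, m):
--     top = 0
--     down = len(matrix) - 1
--     left = 0
--     right = len(matrix[0]) - 1
--     result = []
--     for i in range(left, right + 1):
--         result.append(matrix[top][i])
--     top += 1
--     if top <= down:
--         for j in range(top, down + 1):
--             result.append(matrix[j][right])
--         right -= 1
--         if left <= right:
--             for k in range(right, left - 1, -1):
--                 result.append(matrix[down][k])
--             down -= 1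
--             for l in range(down, top - 1, -1):
--                 result.append(matrix[l][left])
--     return result
-- ===== SOURCE B (Python) =====
-- def BoundaryTraversal(matrix, n, m):
--     rows, cols = len(matrix), len(matrix[0])
--     if cols == 0:
--         return []
--     count = cols if rows == 1 else rows if cols == 1 else 2 * (rows + cols) - 4
--     dirs = ((0, 1), (1, 0), (0, -1), (-1, 0))
--     r = c = d = 0
--     out = []
--     for _ in range(count):
--         out.append(matrix[r][c])
--         dr, dc = dirs[d]
--         if not (0 <= r + dr < rows and 0 <= c + dc < cols):
--             d = (d + 1) % 4
--             dr, dc = dirs[d]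
--         r, c = r + dr, c + dc
--     return out
-- ===== Notes on version B (the rewrite author's own statement) =====
-- stated objective: alternative
-- what changed: B replaces A's four bound-shrinking for-loops by a single perimeter walk: one loop over a precomputed boundary-cell count that carries a position and a direction index, turning right whenever the next step would leave the matrix.
-- intended difference: On matrices whose first row is empty but that have at least two rows, A's negative index right=-1 wraps around and it returns the last element of each lower row, while B returns [] — the intended boundary of a zero-width matrix. — e.g. on BoundaryTraversal([[], [5]], 2, 1): A returns [5], B returns []
import Mathlib
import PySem

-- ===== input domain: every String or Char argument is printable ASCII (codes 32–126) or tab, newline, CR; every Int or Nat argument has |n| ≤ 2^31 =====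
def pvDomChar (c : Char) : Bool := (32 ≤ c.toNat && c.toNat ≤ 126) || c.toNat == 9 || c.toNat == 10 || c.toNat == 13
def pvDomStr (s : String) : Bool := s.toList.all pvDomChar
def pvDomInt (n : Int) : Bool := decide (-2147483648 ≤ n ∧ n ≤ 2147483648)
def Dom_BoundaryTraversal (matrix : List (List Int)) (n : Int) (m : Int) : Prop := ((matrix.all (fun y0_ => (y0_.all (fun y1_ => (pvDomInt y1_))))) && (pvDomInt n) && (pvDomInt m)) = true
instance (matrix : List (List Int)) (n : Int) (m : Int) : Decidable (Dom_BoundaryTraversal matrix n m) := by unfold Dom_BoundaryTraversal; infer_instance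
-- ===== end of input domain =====

-- B replaces A's four bound-shrinking loops by a single perimeter walk with position/direction
-- state (same cost, 'alternative'); return values only — neither program mutates its arguments.

-- ===== PORT A =====
def BoundaryTraversal (matrix : List (List Int)) (n : Int) (m : Int) : List Int :=
  let top : Int := 0
  let down : Int := PySem.List.len matrix - 1
  let left : Int := 0
  let right : Int := PySem.List.len (PySem.List.pyGetD matrix 0 []) - 1
  let result : List Int := []
  let result := (PySem.List.pyRange left (right + 1) 1).foldl
    (fun acc i => acc ++ [PySem.List.pyGetD (PySem.List.pyGetD matrix top []) i 0]) result
  let top := top + 1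
  if top ≤ down then
    let result := (PySem.List.pyRange top (down + 1) 1).foldl
      (fun acc j => acc ++ [PySem.List.pyGetD (PySem.List.pyGetD matrix j []) right 0]) result
    let right := right - 1
    if left ≤ right then
      let result := (PySem.List.pyRange right (left - 1) (-1)).foldl
        (fun acc k => acc ++ [PySem.List.pyGetD (PySem.List.pyGetD matrix down []) k 0]) result
      let down := down - 1
      (PySem.List.pyRange down (top - 1) (-1)).foldl
        (fun acc l => acc ++ [PySem.List.pyGetD (PySem.List.pyGetD matrix l []) left 0]) result
    else result
  else result

-- ===== PORT B =====
-- dirs[d] of Source B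
def bDir (d : Nat) : Int × Int :=
  match d with
  | 0 => (0, 1)
  | 1 => (1, 0)
  | 2 => (0, -1)
  | _ => (-1, 0)

-- the 'for _ in range(count)' loop of Source B, state (r, c, d); produces the appended cells in order
def bWalk (mx : List (List Int)) (rows cols : Int) : Nat → Int → Int → Nat → List Int
  | 0, _, _, _ => []
  | k + 1, r, c, d =>
    let v := PySem.List.pyGetD (PySem.List.pyGetD mx r []) c 0
    let d' := if 0 ≤ r + (bDir d).1 ∧ r + (bDir d).1 < rows ∧ 0 ≤ c + (bDir d).2 ∧ c + (bDir d).2 < cols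
              then d else (d + 1) % 4
    v :: bWalk mx rows cols k (r + (bDir d').1) (c + (bDir d').2) d'

def BoundaryTraversal_alt (matrix : List (List Int)) (n : Int) (m : Int) : List Int :=
  let rows : Int := PySem.List.len matrix
  let cols : Int := PySem.List.len (PySem.List.pyGetD matrix 0 [])
  if cols = 0 then []
  else
    let count : Int := if rows = 1 then cols else if cols = 1 then rows else 2 * (rows + cols) - 4
    bWalk matrix rows cols count.toNat 0 0 0

-- ===== PRECONDITION & SPEC =====
-- Pre_: exactly where the Python A returns (A raises IndexError on an empty matrix, and on a lower
-- row shorter than the first row — or empty, when the first row is empty).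
def Pre_BoundaryTraversal (matrix : List (List Int)) (n : Int) (m : Int) : Prop :=
  matrix ≠ [] ∧ ∀ row ∈ matrix.tail, row ≠ [] ∧ (matrix.headD []).length ≤ row.length
instance (matrix : List (List Int)) (n : Int) (m : Int) : Decidable (Pre_BoundaryTraversal matrix n m) := by unfold Pre_BoundaryTraversal; infer_instance

def pvWitness_BoundaryTraversal : List (List Int) × Int × Int := ([[1, 2], [3, 4]], 2, 2)

-- On matrices whose first row is empty but that have at least two rows, A's negative index right=-1
-- wraps around and it returns the last element of each lower row, while B returns [] — the intended
-- boundary of a zero-width matrix.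
def D_BoundaryTraversal (matrix : List (List Int)) (n : Int) (m : Int) : Prop :=
  matrix.headD [] = [] ∧ matrix.tail ≠ []
instance (matrix : List (List Int)) (n : Int) (m : Int) : Decidable (D_BoundaryTraversal matrix n m) := by unfold D_BoundaryTraversal; infer_instance

def Spec_BoundaryTraversal (matrix : List (List Int)) (n : Int) (m : Int) (out : List Int) : Prop :=
  ¬ D_BoundaryTraversal matrix n m → out = BoundaryTraversal_alt matrix n m
instance (matrix : List (List Int)) (n : Int) (m : Int) (out : List Int) : Decidable (Spec_BoundaryTraversal matrix n m out) := by unfold Spec_BoundaryTraversal; infer_instance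

def pvDiffWitness_BoundaryTraversal : List (List Int) × Int × Int := ([[], [5]], 2, 1)
def pvDiffWitnessOut_BoundaryTraversal : (List Int) × (List Int) := ([5], [])

-- ===== CLAIM (what is proved, stated in full; the proofs are below) =====
def Claim_unchanged_BoundaryTraversal : Prop := ∀ (matrix : List (List Int)) (n : Int) (m : Int), Dom_BoundaryTraversal matrix n m → Pre_BoundaryTraversal matrix n m → Spec_BoundaryTraversal matrix n m (BoundaryTraversal matrix n m)
def Claim_changed_BoundaryTraversal : Prop := Dom_BoundaryTraversal (pvDiffWitness_BoundaryTraversal.1) (pvDiffWitness_BoundaryTraversal.2.1) (pvDiffWitness_BoundaryTraversal.2.2) ∧ Pre_BoundaryTraversal (pvDiffWitness_BoundaryTraversal.1) (pvDiffWitness_BoundaryTraversal.2.1) (pvDiffWitness_BoundaryTraversal.2.2) ∧ D_BoundaryTraversal (pvDiffWitness_BoundaryTraversal.1) (pvDiffWitness_BoundaryTraversal.2.1) (pvDiffWitness_BoundaryTraversal.2.2) ∧ BoundaryTraversal (pvDiffWitness_BoundaryTraversal.1) (pvDiffWitness_BoundaryTraversal.2.1) (pvDiffWitness_BoundaryTraversal.2.2)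 = pvDiffWitnessOut_BoundaryTraversal.1 ∧ BoundaryTraversal_alt (pvDiffWitness_BoundaryTraversal.1) (pvDiffWitness_BoundaryTraversal.2.1) (pvDiffWitness_BoundaryTraversal.2.2) = pvDiffWitnessOut_BoundaryTraversal.2 ∧ pvDiffWitnessOut_BoundaryTraversal.1 ≠ pvDiffWitnessOut_BoundaryTraversal.2
def Claim_exact_BoundaryTraversal : Prop := ∀ (matrix : List (List Int)) (n : Int) (m : Int), Dom_BoundaryTraversal matrix n m → Pre_BoundaryTraversal matrix n m → D_BoundaryTraversal matrix n m → BoundaryTraversal matrix n m ≠ BoundaryTraversal_alt matrix n m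

-- ===== LEMMAS AND PROOFS =====

-- the cell both programs read at (r, c)
def gCell (mx : List (List Int)) (r c : Int) : Int :=
  PySem.List.pyGetD (PySem.List.pyGetD mx r []) c 0

-- B's walk going up the left column (direction 3), r down to 1
theorem walk_up (mx : List (List Int)) (R C : Int) (hC : 1 ≤ C) :
    ∀ (k : Nat) (r : Int), 0 ≤ r → r < R → k = r.toNat →
    bWalk mx R C k r 0 3 = (PySem.List.pyRange r 0 (-1)).map (fun l => gCell mx l 0) := by
  intro k
  induction k with
  | zero =>
    intro r h0 _ hk
    rw [bWalk, PySem.List.pyRange_neg_one_eq_nil (by omega)]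
    simp
  | succ k ih =>
    intro r h0 hR hk
    rw [bWalk]
    rw [if_pos (by simp only [bDir]; norm_num; omega)]
    rw [PySem.List.pyRange_neg_one_cons (by omega)]
    simp only [List.map_cons]
    have := ih (r - 1) (by omega) (by omega) (by omega)
    simp only [bDir] at this ⊢
    norm_num at this ⊢
    exact ⟨rfl, this⟩

-- B's walk along the bottom row (direction 2), then turning up the left column
theorem walk_bl (mx : List (List Int)) (R C : Int) (hR : 2 ≤ R) (hC : 1 ≤ C) :
    ∀ (k : Nat) (c : Int), 0 ≤ c → c < C → k = (c + 1).toNat + (R - 2).toNat →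
    bWalk mx R C k (R - 1) c 2 =
      (PySem.List.pyRange c (-1) (-1)).map (fun x => gCell mx (R - 1) x)
      ++ (PySem.List.pyRange (R - 2) 0 (-1)).map (fun l => gCell mx l 0) := by
  intro k
  induction k with
  | zero => intro c h0 _ hk; omega
  | succ k ih =>
    intro c h0 hC' hk
    rw [bWalk]
    rw [PySem.List.pyRange_neg_one_cons (by omega : (-1:Int) < c)]
    simp only [List.map_cons, List.cons_append]
    by_cases hc : 1 ≤ c
    · rw [if_pos (by simp only [bDir]; norm_num; omega)]
      have := ih (c - 1) (by omega) (by omega) (by omega)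
      simp only [bDir] at this ⊢
      norm_num at this ⊢
      exact ⟨rfl, this⟩
    · have hc0 : c = 0 := by omega
      subst hc0
      rw [if_neg (by simp only [bDir]; norm_num)]
      have := walk_up mx R C hC k (R - 2) (by omega) (by omega) (by omega)
      simp only [bDir] at this ⊢
      norm_num at this ⊢
      refine ⟨rfl, ?_⟩
      rw [show R - 1 + -1 = R - 2 by ring]
      exact this

-- B's walk down the right column (direction 1), then bottom row and left column
theorem walk_r (mx : List (List Int)) (R C : Int) (hR : 2 ≤ R) (hC : 2 ≤ C) :
    ∀ (k : Nat) (r : Int), 1 ≤ r → r < R → k = (R - r).toNat + (C - 1).toNat + (R - 2).toNat →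
    bWalk mx R C k r (C - 1) 1 =
      (PySem.List.pyRange r R 1).map (fun j => gCell mx j (C - 1))
      ++ (PySem.List.pyRange (C - 2) (-1) (-1)).map (fun x => gCell mx (R - 1) x)
      ++ (PySem.List.pyRange (R - 2) 0 (-1)).map (fun l => gCell mx l 0) := by
  intro k
  induction k with
  | zero => intro r h1 hr hk; omega
  | succ k ih =>
    intro r h1 hr hk
    rw [bWalk]
    rw [PySem.List.pyRange_one_cons (by omega : r < R)]
    simp only [List.map_cons, List.cons_append]
    by_cases hc : r + 1 < R
    · rw [if_pos (by simp only [bDir]; norm_num; omega)]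
      have := ih (r + 1) (by omega) (by omega) (by omega)
      simp only [bDir] at this ⊢
      norm_num at this ⊢
      exact ⟨rfl, this⟩
    · have hr1 : r = R - 1 := by omega
      subst hr1
      rw [if_neg (by simp only [bDir]; norm_num)]
      have := walk_bl mx R C hR (by omega) k (C - 2) (by omega) (by omega) (by omega)
      simp only [bDir] at this ⊢
      norm_num at this ⊢
      refine ⟨rfl, ?_⟩
      rw [show C - 1 + -1 = C - 2 by ring]
      exact this

-- B's whole walk for matrices with at least 2 rows and 2 columns
theorem walk_t (mx : List (List Int)) (R C : Int) (hR : 2 ≤ R) (hC : 2 ≤ C) :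
    ∀ (k : Nat) (c : Int), 0 ≤ c → c < C → k = (C - c).toNat + (R - 1).toNat + (C - 1).toNat + (R - 2).toNat →
    bWalk mx R C k 0 c 0 =
      (PySem.List.pyRange c C 1).map (fun i => gCell mx 0 i)
      ++ (PySem.List.pyRange 1 R 1).map (fun j => gCell mx j (C - 1))
      ++ (PySem.List.pyRange (C - 2) (-1) (-1)).map (fun x => gCell mx (R - 1) x)
      ++ (PySem.List.pyRange (R - 2) 0 (-1)).map (fun l => gCell mx l 0) := by
  intro k
  induction k with
  | zero => intro c h0 hc hk; omega
  | succ k ih =>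
    intro c h0 hc hk
    rw [bWalk]
    rw [PySem.List.pyRange_one_cons (by omega : c < C)]
    simp only [List.map_cons, List.cons_append]
    by_cases hc1 : c + 1 < C
    · rw [if_pos (by simp only [bDir]; norm_num; omega)]
      have := ih (c + 1) (by omega) (by omega) (by omega)
      simp only [bDir] at this ⊢
      norm_num at this ⊢
      exact ⟨rfl, this⟩
    · have hcC : c = C - 1 := by omega
      subst hcC
      rw [if_neg (by simp only [bDir]; norm_num)]
      have := walk_r mx R C hR hC k 1 (by omega) (by omega) (by omega)
      simp only [bDir] at this ⊢
      norm_num at this ⊢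
      exact ⟨rfl, this⟩

-- B's whole walk for a single-row matrix
theorem walk_row1 (mx : List (List Int)) (C : Int) :
    ∀ (k : Nat) (c : Int), 0 ≤ c → c < C → k = (C - c).toNat →
    bWalk mx 1 C k 0 c 0 = (PySem.List.pyRange c C 1).map (fun i => gCell mx 0 i) := by
  intro k
  induction k with
  | zero => intro c h0 hc hk; omega
  | succ k ih =>
    intro c h0 hc hk
    rw [bWalk]
    rw [PySem.List.pyRange_one_cons (by omega : c < C)]
    simp only [List.map_cons]
    by_cases hc1 : c + 1 < C
    · rw [if_pos (by simp only [bDir]; norm_num; omega)]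
      have := ih (c + 1) (by omega) (by omega) (by omega)
      simp only [bDir] at this ⊢
      norm_num at this ⊢
      exact ⟨rfl, this⟩
    · have hk0 : k = 0 := by omega
      have hcC : c = C - 1 := by omega
      subst hk0; subst hcC
      rw [if_neg (by simp only [bDir]; norm_num)]
      rw [bWalk]
      rw [show C - 1 + 1 = C by ring, PySem.List.pyRange_one_eq_nil le_rfl]
      rfl

-- B's walk down a single column (direction 1), r from 1 to R-1
theorem walk_d1 (mx : List (List Int)) (R : Int) :
    ∀ (k : Nat) (r : Int), 1 ≤ r → r < R → k = (R - r).toNat →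
    bWalk mx R 1 k r 0 1 = (PySem.List.pyRange r R 1).map (fun j => gCell mx j 0) := by
  intro k
  induction k with
  | zero => intro r h1 hr hk; omega
  | succ k ih =>
    intro r h1 hr hk
    rw [bWalk]
    rw [PySem.List.pyRange_one_cons (by omega : r < R)]
    simp only [List.map_cons]
    by_cases hc : r + 1 < R
    · rw [if_pos (by simp only [bDir]; norm_num; omega)]
      have := ih (r + 1) (by omega) (by omega) (by omega)
      simp only [bDir] at this ⊢
      norm_num at this ⊢
      exact ⟨rfl, this⟩
    · have hk0 : k = 0 := by omega
      have hr1 : r = R - 1 := by omega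
      subst hk0; subst hr1
      rw [if_neg (by simp only [bDir]; norm_num)]
      rw [bWalk]
      rw [show R - 1 + 1 = R by ring, PySem.List.pyRange_one_eq_nil le_rfl]
      rfl

-- A equals B on every nonempty matrix outside the change region
theorem A_eq_alt (r0 : List Int) (rest : List (List Int)) (n m : Int)
    (h : 1 ≤ (r0.length : Int) ∨ rest = []) :
    BoundaryTraversal (r0 :: rest) n m = BoundaryTraversal_alt (r0 :: rest) n m := by
  rcases eq_or_ne rest [] with hrest | hrest
  · subst hrest
    rcases Nat.eq_zero_or_pos r0.length with hc | hc
    · simp [BoundaryTraversal, BoundaryTraversal_alt, hc, PySem.List.pyRange_one_eq_nil]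
    · have hC : 1 ≤ (r0.length : Int) := by exact_mod_cast hc
      have hw := walk_row1 (mx := [r0]) (C := (r0.length : Int))
        ((r0.length : Int)).toNat 0 le_rfl (by omega) (by omega)
      simp only [BoundaryTraversal, BoundaryTraversal_alt, PySem.List.len_eq,
        PySem.List.pyGetD_zero_cons, List.length_cons, List.length_nil]
      norm_num
      rw [if_neg (List.length_pos_iff.mp hc)]
      norm_num at hw
      rw [hw]
      rw [← List.flatMap_def, ← List.map_eq_flatMap]
      simp [gCell, PySem.List.pyGetD_zero_cons]
  · have hC : 1 ≤ (r0.length : Int) := h.resolve_right hrest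
    have hL : 1 ≤ rest.length := List.length_pos_iff.mpr (by simpa using hrest)
    rcases eq_or_ne (r0.length : Int) 1 with hc1 | hc1
    · -- single column
      have hw := walk_d1 (mx := (r0 :: rest)) (R := (rest.length : Int) + 1)
        rest.length 1 (by omega) (by omega) (by omega)
      simp only [BoundaryTraversal, BoundaryTraversal_alt, PySem.List.len_eq,
        PySem.List.pyGetD_zero_cons, List.length_cons]
      norm_num
      have hc1' : r0.length = 1 := by exact_mod_cast hc1
      rw [if_pos hL, if_neg (by omega : ¬ 1 < r0.length),
        if_neg (by simp [← List.length_pos_iff, hc1'] : ¬ r0 = []),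
        if_neg hrest, if_pos hc1', hc1']
      rw [show ((rest.length : Int) + 1).toNat = rest.length + 1 by omega]
      rw [bWalk]
      rw [if_neg (by simp only [bDir]; norm_num)]
      simp only [bDir]
      norm_num
      rw [hw]
      rw [← List.flatMap_def, ← List.map_eq_flatMap, ← List.flatMap_def, ← List.map_eq_flatMap]
      have hr01 : PySem.List.pyRange 0 1 1 = [0] := by decide
      simp [gCell, hr01]
    · -- at least 2 rows and 2 columns
      have hC2 : 2 ≤ (r0.length : Int) := by omega
      have hw := walk_t (mx := (r0 :: rest)) (R := (rest.length : Int) + 1)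
        (C := (r0.length : Int)) (by omega) hC2
        (2 * (((rest.length : Int) + 1) + (r0.length : Int)) - 4).toNat 0 le_rfl (by omega) (by omega)
      simp only [BoundaryTraversal, BoundaryTraversal_alt, PySem.List.len_eq,
        PySem.List.pyGetD_zero_cons, List.length_cons]
      norm_num
      rw [if_pos hL, if_pos (by omega : 1 < r0.length),
        if_neg (by simp [← List.length_pos_iff]; omega : ¬ r0 = []),
        if_neg hrest, if_neg (by omega : ¬ r0.length = 1)]
      rw [hw]
      rw [← List.flatMap_def, ← List.map_eq_flatMap, ← List.flatMap_def, ← List.map_eq_flatMap,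
        ← List.flatMap_def, ← List.map_eq_flatMap, ← List.flatMap_def, ← List.map_eq_flatMap]
      have e1 : (rest.length : Int) + 1 - 1 = (rest.length : Int) := by ring
      have e2 : (rest.length : Int) + 1 - 2 = (rest.length : Int) - 1 := by ring
      have e3 : (r0.length : Int) - 1 - 1 = (r0.length : Int) - 2 := by ring
      rw [e1, e2, e3]
      simp [gCell, PySem.List.pyGetD_zero_cons, List.append_assoc]

-- inside D_ the two programs differ on every input admitted by Pre_
theorem tight_main (matrix : List (List Int)) (n m : Int)
    (hd : D_BoundaryTraversal matrix n m) :
    BoundaryTraversal matrix n m ≠ BoundaryTraversal_alt matrix n m := by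
  unfold D_BoundaryTraversal at hd
  cases matrix with
  | nil => simp at hd
  | cons r0 rest =>
    simp only [List.headD_cons, List.tail_cons] at hd
    obtain ⟨hr0, hr⟩ := hd
    have hL : 1 ≤ rest.length := List.length_pos_iff.mpr (by simpa using hr)
    subst hr0
    simp only [BoundaryTraversal, BoundaryTraversal_alt, PySem.List.len_eq,
      PySem.List.pyGetD_zero_cons, List.length_cons, List.length_nil]
    norm_num
    exact ⟨hL, [PySem.List.pyGetD (PySem.List.pyGetD ([] :: rest) 1 []) (-1) 0], 1,
      le_refl 1, by exact_mod_cast hL, rfl, by simp⟩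

-- ===== VERDICT (by name: the statement is the Claim_ definition above) =====
theorem BoundaryTraversal_spec : Claim_unchanged_BoundaryTraversal := by
  intro matrix n m _ hpre hnd
  unfold D_BoundaryTraversal at hnd
  cases matrix with
  | nil => exact absurd rfl hpre.1
  | cons r0 rest =>
    apply A_eq_alt
    by_cases hr : rest = []
    · exact Or.inr hr
    · left
      simp only [List.headD_cons, List.tail_cons] at hnd
      have h1 : 0 < r0.length := List.length_pos_iff.mpr (by tauto)
      omega

theorem BoundaryTraversal_changed : Claim_changed_BoundaryTraversal := by
  unfold Claim_changed_BoundaryTraversal; decide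

theorem BoundaryTraversal_tight : Claim_exact_BoundaryTraversal := by
  intro matrix n m _ _ hd
  exact tight_main matrix n m hd
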